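-- pv_equiv track=rewrite | github.com/kphillips001/LS-Python-Code-Challenges | longestPossible.py | csLongestPossible
-- ===== SOURCE A (Python) =====
-- def csLongestPossible(str_1, str_2):
--     # theres a few ways to get this done
--     # one of the simplest ways is to just build an array of unique characters
--     # then sort it and return it
--     unique_chars = []
--
--     for char in str_1:
--         # check if the character has never been seen before
--         if char not in unique_chars:
--             # add to unique_chars
--             unique_chars.append(char)
--
--     # do the same loop for str_2
--     for char in str_2:
--         # check if the character has never been seen before
--         if char not in unique_chars:
--             # add to unique_chars
--             unique_chars.append(char)
--
--     # sort the array
--     unique_chars.sort()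
--
--     # to turn the array to a string, use string.join()
--     return ''.join(unique_chars)
-- ===== SOURCE B (Python) =====
-- def csLongestPossible(str_1, str_2):
--     # sort first, then dedup by adjacency in one pass (no membership container)
--     res = []
--     prev = None
--     for c in sorted(str_1 + str_2):
--         if c != prev:
--             res.append(c)
--             prev = c
--     return ''.join(res)
-- ===== Notes on version B (the rewrite author's own statement) =====
-- stated objective: alternative
-- what changed: A dedups with a membership scan per character and then sorts the unique characters; B sorts the whole concatenation once and removes duplicates by comparing each character with the previously kept one in a single adjacency pass (no membership container).
import Mathlib
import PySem

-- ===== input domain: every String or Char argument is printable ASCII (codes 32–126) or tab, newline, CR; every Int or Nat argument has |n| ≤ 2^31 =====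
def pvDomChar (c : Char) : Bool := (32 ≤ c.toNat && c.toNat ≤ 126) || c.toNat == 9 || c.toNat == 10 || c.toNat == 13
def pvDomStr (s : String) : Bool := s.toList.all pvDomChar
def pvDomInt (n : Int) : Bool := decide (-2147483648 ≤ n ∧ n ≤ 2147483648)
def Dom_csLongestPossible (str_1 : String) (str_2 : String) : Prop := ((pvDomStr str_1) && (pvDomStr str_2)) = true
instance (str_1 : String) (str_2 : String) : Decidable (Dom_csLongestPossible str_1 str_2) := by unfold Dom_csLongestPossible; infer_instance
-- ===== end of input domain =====

-- B sorts the concatenation once and drops adjacent duplicates in one pass,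
-- instead of A's per-character membership scan followed by a sort (objective: alternative).

-- ===== PORT A =====
def csLongestPossible (str_1 : String) (str_2 : String) : String :=
  -- unique_chars = []; for char in str_1: if char not in unique_chars: append
  let uc1 := str_1.toList.foldl (fun acc char => if char ∈ acc then acc else acc ++ [char]) []
  -- same loop for str_2
  let uc2 := str_2.toList.foldl (fun acc char => if char ∈ acc then acc else acc ++ [char]) uc1
  -- unique_chars.sort(); return ''.join(unique_chars)
  String.mk (PySem.List.sorted uc2 (fun c => c) false)

-- ===== PORT B =====
-- the loop of Source B: state is (prev, rest); 'if c != prev: res.append(c); prev = c'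
def pvAdjDedup : Option Char → List Char → List Char
  | _, [] => []
  | prev, c :: cs => if some c = prev then pvAdjDedup prev cs else c :: pvAdjDedup (some c) cs

def csLongestPossible_alt (str_1 : String) (str_2 : String) : String :=
  String.mk (pvAdjDedup none (PySem.List.sorted (str_1.toList ++ str_2.toList) (fun c => c) false))

-- ===== PRECONDITION & SPEC =====
def Spec_csLongestPossible (str_1 : String) (str_2 : String) (out : String) : Prop := out = csLongestPossible_alt str_1 str_2
instance (str_1 : String) (str_2 : String) (out : String) : Decidable (Spec_csLongestPossible str_1 str_2 out) := by unfold Spec_csLongestPossible; infer_instance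

-- ===== CLAIM (what is proved, stated in full; the proofs are below) =====
def Claim_equal_csLongestPossible : Prop := ∀ (str_1 : String) (str_2 : String), Dom_csLongestPossible str_1 str_2 → Spec_csLongestPossible str_1 str_2 (csLongestPossible str_1 str_2)

-- ===== LEMMAS AND PROOFS =====

-- A's dedup fold: membership and nodup
theorem mem_dedupFold (xs : List Char) : ∀ (acc : List Char) (x : Char),
    x ∈ xs.foldl (fun acc char => if char ∈ acc then acc else acc ++ [char]) acc ↔ x ∈ acc ∨ x ∈ xs := by
  induction xs with
  | nil => simp
  | cons c cs ih =>
    intro acc x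
    simp only [List.foldl_cons]
    by_cases hc : c ∈ acc
    · simp [hc, ih]
      constructor
      · rintro (h | h)
        · exact Or.inl h
        · exact Or.inr (Or.inr h)
      · rintro (h | h | h)
        · exact Or.inl h
        · exact Or.inl (h ▸ hc)
        · exact Or.inr h
    · simp [hc, ih, List.mem_append]
      tauto
theorem nodup_dedupFold (xs : List Char) : ∀ (acc : List Char), acc.Nodup →
    (xs.foldl (fun acc char => if char ∈ acc then acc else acc ++ [char]) acc).Nodup := by
  induction xs with
  | nil => intro acc h; simpa using h
  | cons c cs ih =>
    intro acc h
    simp only [List.foldl_cons]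
    by_cases hc : c ∈ acc
    · simp only [hc, if_true]; exact ih acc h
    · simp only [hc, if_false]
      refine ih _ ?_
      have hd : ∀ a ∈ acc, ¬ a = c := fun a ha hac => hc (hac ▸ ha)
      simp only [List.nodup_append, List.nodup_singleton, true_and]
      simp [h]
      exact hd

-- B's adjacent dedup: output members come from the input
theorem adjDedup_subset : ∀ (cs : List Char) (prev : Option Char) (x : Char),
    x ∈ pvAdjDedup prev cs → x ∈ cs := by
  intro cs
  induction cs with
  | nil => intro prev x h; simpa [pvAdjDedup] using h
  | cons c cs ih =>
    intro prev x h
    simp only [pvAdjDedup] at h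
    split at h
    · exact List.mem_cons_of_mem _ (ih _ _ h)
    · rcases List.mem_cons.mp h with h | h
      · exact h ▸ List.mem_cons_self ..
      · exact List.mem_cons_of_mem _ (ih _ _ h)

-- every input member reaches the output (or was the previous char)
theorem mem_adjDedup : ∀ (cs : List Char) (prev : Option Char) (x : Char),
    x ∈ cs → some x = prev ∨ x ∈ pvAdjDedup prev cs := by
  intro cs
  induction cs with
  | nil => simp_all
  | cons c cs ih =>
    intro prev x h
    simp only [pvAdjDedup]
    rcases List.mem_cons.mp h with rfl | h
    · by_cases hc : some x = prev
      · exact Or.inl hc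
      · simp [hc]
    · by_cases hc : some c = prev
      · simpa [hc] using ih prev x h
      · simp only [hc, if_false]
        rcases ih (some c) x h with h' | h'
        · exact Or.inr (List.mem_cons.mpr (Or.inl (Option.some_injective _ h')))
        · exact Or.inr (List.mem_cons_of_mem _ h')

-- on a ≤-sorted input (with prev below it), the output is strictly increasing
-- and strictly above prev
theorem adjDedup_pairwise : ∀ (cs : List Char), cs.Pairwise (· ≤ ·) →
    ∀ (prev : Option Char), (∀ p, prev = some p → ∀ b ∈ cs, p ≤ b) →
    (pvAdjDedup prev cs).Pairwise (· < ·) ∧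
      ∀ x ∈ pvAdjDedup prev cs, ∀ p, prev = some p → p < x := by
  intro cs
  induction cs with
  | nil => intro _ prev _; simp [pvAdjDedup]
  | cons c cs ih =>
    intro hs prev hb
    have hc_le : ∀ b ∈ cs, c ≤ b := (List.pairwise_cons.mp hs).1
    have hs' : cs.Pairwise (· ≤ ·) := (List.pairwise_cons.mp hs).2
    simp only [pvAdjDedup]
    by_cases hc : some c = prev
    · simp only [hc, if_true]
      exact ih hs' prev (fun p hp b hbcs => hb p hp b (List.mem_cons_of_mem _ hbcs))
    · simp only [hc, if_false]
      obtain ⟨htp, hab⟩ := ih hs' (some c) (fun p hp b hbcs => by cases hp; exact hc_le b hbcs)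
      constructor
      · exact List.pairwise_cons.mpr ⟨fun x hx => hab x hx c rfl, htp⟩
      · intro x hx p hp
        have hpc : p < c := by
          have h1 : p ≤ c := hb p hp c (List.mem_cons_self ..)
          have h2 : p ≠ c := fun h => hc (by rw [hp, h])
          exact lt_of_le_of_ne h1 h2
        rcases List.mem_cons.mp hx with rfl | hx
        · exact hpc
        · exact lt_trans hpc (hab x hx c rfl)

-- ===== VERDICT (by name: the statement is the Claim_ definition above) =====
theorem csLongestPossible_spec : Claim_equal_csLongestPossible := by
  intro str_1 str_2 _
  unfold Spec_csLongestPossible csLongestPossible csLongestPossible_alt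
  set xs := str_1.toList ++ str_2.toList with hxs
  have hfold : str_2.toList.foldl (fun acc char => if char ∈ acc then acc else acc ++ [char])
      (str_1.toList.foldl (fun acc char => if char ∈ acc then acc else acc ++ [char]) [])
      = xs.foldl (fun acc char => if char ∈ acc then acc else acc ++ [char]) [] := by
    rw [hxs, List.foldl_append]
  simp only [hfold]
  set LA := xs.foldl (fun acc char => if char ∈ acc then acc else acc ++ [char]) [] with hLA
  set S := PySem.List.sorted xs (fun c => c) false with hS
  set LB := pvAdjDedup none S with hLB
  -- S is ≤-sorted, so LB is strictly increasing
  have hSp : S.Pairwise (· ≤ ·) := PySem.List.sorted_pairwise xs (fun c => c) ..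
  obtain ⟨hLBp, -⟩ := adjDedup_pairwise S hSp none (by simp)
  -- LB and LA have the same members and are both nodup, hence a permutation
  have hmemS : ∀ x, x ∈ S ↔ x ∈ xs := fun x => PySem.List.mem_sorted ..
  have hmemLB : ∀ x, x ∈ LB ↔ x ∈ xs := by
    intro x
    constructor
    · intro h; exact (hmemS x).mp (adjDedup_subset S none x h)
    · intro h
      rcases mem_adjDedup S none x ((hmemS x).mpr h) with h' | h'
      · simp at h'
      · exact h'
  have hmemLA : ∀ x, x ∈ LA ↔ x ∈ xs := by
    intro x; rw [hLA, mem_dedupFold]; simp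
  have hLBnd : LB.Nodup := hLBp.imp ne_of_lt
  have hLAnd : LA.Nodup := nodup_dedupFold xs [] (List.nodup_nil)
  have hperm : LB.Perm LA := by
    rw [List.perm_ext_iff_of_nodup hLBnd hLAnd]
    intro x; rw [hmemLB, hmemLA]
  exact congrArg String.mk (PySem.List.sorted_eq_of_perm_of_pairwise_lt LA LB (fun c => c) hperm hLBp)
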